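-- pv_equiv track=rewrite | github.com/wschosta/dod-budget-analysis | api/routes/keyword_helpers.py | color_of_money
-- ===== SOURCE A (Python) =====
-- def color_of_money(approp_title: str | None) -> str:
--     """Map appropriation title to a standard color-of-money category."""
--     if not approp_title:
--         return "Unknown"
--     t = approp_title.upper()
--     if any(k in t for k in ("RDT", "RESEARCH", "DEVELOPMENT", "R&D")):
--         return "RDT&E"
--     if "PROCURE" in t:
--         return "Procurement"
--     if any(k in t for k in ("OPER", "MAINT", "O&M")):
--         return "O&M"
--     if any(k in t for k in ("MILCON", "CONSTRUCTION")):
--         return "MILCON"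
--     if any(k in t for k in ("MILPERS", "PERSONNEL")):
--         return "Military Personnel"
--     return approp_title
-- ===== SOURCE B (Python) =====
-- # Flat keyword -> (priority, category) index; one full scan picks the
-- # lowest-priority (= highest-precedence) matching keyword instead of a
-- # short-circuiting chain of grouped membership tests.
-- KEYWORD_CATEGORY = {
--     "RDT": (0, "RDT&E"),
--     "RESEARCH": (0, "RDT&E"),
--     "DEVELOPMENT": (0, "RDT&E"),
--     "R&D": (0, "RDT&E"),
--     "PROCURE": (1, "Procurement"),
--     "OPER": (2, "O&M"),
--     "MAINT": (2, "O&M"),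
--     "O&M": (2, "O&M"),
--     "MILCON": (3, "MILCON"),
--     "CONSTRUCTION": (3, "MILCON"),
--     "MILPERS": (4, "Military Personnel"),
--     "PERSONNEL": (4, "Military Personnel"),
-- }
--
--
-- def color_of_money(approp_title):
--     """Map appropriation title to a standard color-of-money category."""
--     if not approp_title:
--         return "Unknown"
--     t = approp_title.upper()
--     best = None
--     for kw, (prio, cat) in KEYWORD_CATEGORY.items():
--         if kw in t and (best is None or prio < best[0]):
--             best = (prio, cat)
--     return best[1] if best is not None else approp_title
-- ===== Notes on version B (the rewrite author's own statement) =====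
-- stated objective: alternative
-- what changed: Instead of a short-circuiting chain of grouped any()-membership tests, B indexes every keyword in a flat keyword->(priority,category) dict and makes one full scan over all 12 keywords, keeping the matching entry of lowest priority; the fallback returns the original title.
import Mathlib
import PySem

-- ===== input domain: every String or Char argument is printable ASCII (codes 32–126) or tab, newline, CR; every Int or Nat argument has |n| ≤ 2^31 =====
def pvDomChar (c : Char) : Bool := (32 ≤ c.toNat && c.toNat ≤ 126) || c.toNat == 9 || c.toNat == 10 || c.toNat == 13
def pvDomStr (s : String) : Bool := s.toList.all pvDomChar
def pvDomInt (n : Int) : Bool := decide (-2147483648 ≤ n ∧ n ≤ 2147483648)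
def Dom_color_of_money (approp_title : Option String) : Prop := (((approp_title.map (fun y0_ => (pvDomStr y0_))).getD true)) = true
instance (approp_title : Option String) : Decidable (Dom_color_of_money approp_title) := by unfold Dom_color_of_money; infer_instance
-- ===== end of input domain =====

-- B replaces A's short-circuit chain of grouped membership tests by one full scan over a
-- flat keyword->(priority,category) index keeping the lowest-priority match (objective:
-- alternative); behaviour identical.

-- ===== PORT A =====
def color_of_money (approp_title : Option String) : String :=
  match approp_title with
  | none => "Unknown"
  | some s =>
    if s = "" then "Unknown"
    else
      let t := PySem.Str.upper s
      if ["RDT", "RESEARCH", "DEVELOPMENT", "R&D"].any (fun k => PySem.Str.isIn k t) then "RDT&E"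
      else if PySem.Str.isIn "PROCURE" t then "Procurement"
      else if ["OPER", "MAINT", "O&M"].any (fun k => PySem.Str.isIn k t) then "O&M"
      else if ["MILCON", "CONSTRUCTION"].any (fun k => PySem.Str.isIn k t) then "MILCON"
      else if ["MILPERS", "PERSONNEL"].any (fun k => PySem.Str.isIn k t) then "Military Personnel"
      else s

-- ===== PORT B =====
-- the flat KEYWORD_CATEGORY dict of Source B, in insertion order
def pvKeywordCategory : List (String × Int × String) :=
  [ ("RDT", 0, "RDT&E"), ("RESEARCH", 0, "RDT&E"), ("DEVELOPMENT", 0, "RDT&E"), ("R&D", 0, "RDT&E")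
  , ("PROCURE", 1, "Procurement")
  , ("OPER", 2, "O&M"), ("MAINT", 2, "O&M"), ("O&M", 2, "O&M")
  , ("MILCON", 3, "MILCON"), ("CONSTRUCTION", 3, "MILCON")
  , ("MILPERS", 4, "Military Personnel"), ("PERSONNEL", 4, "Military Personnel") ]

-- the `for kw, (prio, cat) in KEYWORD_CATEGORY.items():` loop with accumulator `best`
def pvScan (t : String) (best : Option (Int × String)) : List (String × Int × String) → Option (Int × String)
  | [] => best
  | (kw, prio, cat) :: rest =>
      if PySem.Str.isIn kw t && (match best with | none => true | some b => decide (prio < b.1)) then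
        pvScan t (some (prio, cat)) rest
      else
        pvScan t best rest

def color_of_money_alt (approp_title : Option String) : String :=
  match approp_title with
  | none => "Unknown"
  | some s =>
    if s = "" then "Unknown"
    else
      let t := PySem.Str.upper s
      match pvScan t none pvKeywordCategory with
      | some b => b.2
      | none => s

-- ===== PRECONDITION & SPEC =====
def Spec_color_of_money (approp_title : Option String) (out : String) : Prop := out = color_of_money_alt approp_title
instance (approp_title : Option String) (out : String) : Decidable (Spec_color_of_money approp_title out) := by unfold Spec_color_of_money; infer_instance

-- ===== CLAIM =====
def Claim_equal_color_of_money : Prop := ∀ (approp_title : Option String), Dom_color_of_money approp_title → Spec_color_of_money approp_title (color_of_money approp_title)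

-- ===== LEMMAS AND PROOFS =====

-- ===== VERDICT =====
theorem color_of_money_spec : Claim_equal_color_of_money := by
  intro approp_title _
  unfold Spec_color_of_money color_of_money color_of_money_alt
  cases approp_title with
  | none => rfl
  | some s =>
    by_cases hs : s = ""
    · simp [hs]
    · simp only [hs, if_false]
      by_cases h1 : PySem.Chars.isIn ['R', 'D', 'T'] (PySem.Chars.upper s.toList) = true
      · simp [pvScan, pvKeywordCategory, h1]
      by_cases h2 : PySem.Chars.isIn ['R', 'E', 'S', 'E', 'A', 'R', 'C', 'H'] (PySem.Chars.upper s.toList) = true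
      · simp [pvScan, pvKeywordCategory, h1, h2]
      by_cases h3 : PySem.Chars.isIn ['D', 'E', 'V', 'E', 'L', 'O', 'P', 'M', 'E', 'N', 'T'] (PySem.Chars.upper s.toList) = true
      · simp [pvScan, pvKeywordCategory, h1, h2, h3]
      by_cases h4 : PySem.Chars.isIn ['R', '&', 'D'] (PySem.Chars.upper s.toList) = true
      · simp [pvScan, pvKeywordCategory, h1, h2, h3, h4]
      by_cases h5 : PySem.Chars.isIn ['P', 'R', 'O', 'C', 'U', 'R', 'E'] (PySem.Chars.upper s.toList) = true
      · simp [pvScan, pvKeywordCategory, h1, h2, h3, h4, h5]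
      by_cases h6 : PySem.Chars.isIn ['O', 'P', 'E', 'R'] (PySem.Chars.upper s.toList) = true
      · simp [pvScan, pvKeywordCategory, h1, h2, h3, h4, h5, h6]
      by_cases h7 : PySem.Chars.isIn ['M', 'A', 'I', 'N', 'T'] (PySem.Chars.upper s.toList) = true
      · simp [pvScan, pvKeywordCategory, h1, h2, h3, h4, h5, h6, h7]
      by_cases h8 : PySem.Chars.isIn ['O', '&', 'M'] (PySem.Chars.upper s.toList) = true
      · simp [pvScan, pvKeywordCategory, h1, h2, h3, h4, h5, h6, h7, h8]
      by_cases h9 : PySem.Chars.isIn ['M', 'I', 'L', 'C', 'O', 'N'] (PySem.Chars.upper s.toList) = true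
      · simp [pvScan, pvKeywordCategory, h1, h2, h3, h4, h5, h6, h7, h8, h9]
      by_cases h10 : PySem.Chars.isIn ['C', 'O', 'N', 'S', 'T', 'R', 'U', 'C', 'T', 'I', 'O', 'N'] (PySem.Chars.upper s.toList) = true
      · simp [pvScan, pvKeywordCategory, h1, h2, h3, h4, h5, h6, h7, h8, h9, h10]
      by_cases h11 : PySem.Chars.isIn ['M', 'I', 'L', 'P', 'E', 'R', 'S'] (PySem.Chars.upper s.toList) = true
      · simp [pvScan, pvKeywordCategory, h1, h2, h3, h4, h5, h6, h7, h8, h9, h10, h11]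
      by_cases h12 : PySem.Chars.isIn ['P', 'E', 'R', 'S', 'O', 'N', 'N', 'E', 'L'] (PySem.Chars.upper s.toList) = true
      · simp [pvScan, pvKeywordCategory, h1, h2, h3, h4, h5, h6, h7, h8, h9, h10, h11, h12]
      simp [pvScan, pvKeywordCategory, h1, h2, h3, h4, h5, h6, h7, h8, h9, h10, h11, h12]
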